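-- pv_equiv track=rewrite | github.com/bucknercd/forge | forge/execution/write_body_sanitize.py | _terraform_strip_spurious_slash_quotes
-- ===== SOURCE A (Python) =====
-- def _terraform_strip_spurious_slash_quotes(body: str) -> str:
--     """HCL: treat ``#`` and ``//`` as line comments; ``/* */`` block; ``"`` strings."""
--     out: list[str] = []
--     i = 0
--     n = len(body)
--     state = "code"
--
--     while i < n:
--         ch = body[i]
--         if state == "code":
--             if ch == "#":
--                 out.append("#")
--                 i += 1
--                 state = "line_hash"
--                 continue
--             if i + 1 < n and body[i : i + 2] == "//":
--                 out.append("//")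
--                 i += 2
--                 state = "line_slash"
--                 continue
--             if i + 1 < n and body[i : i + 2] == "/*":
--                 out.append("/*")
--                 i += 2
--                 state = "block"
--                 continue
--             if ch == '"':
--                 out.append('"')
--                 i += 1
--                 state = "dstr"
--                 continue
--             if ch == "\\" and i + 1 < n and body[i + 1] in "\"'":
--                 out.append(body[i + 1])
--                 i += 2
--                 continue
--             out.append(ch)
--             i += 1
--             continue
--
--         if state in {"line_hash", "line_slash"}:
--             if ch == "\n":
--                 out.append(ch)
--                 i += 1
--                 state = "code"
--             else:
--                 out.append(ch)
--                 i += 1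
--             continue
--
--         if state == "block":
--             if i + 1 < n and body[i : i + 2] == "*/":
--                 out.append("*/")
--                 i += 2
--                 state = "code"
--             else:
--                 out.append(ch)
--                 i += 1
--             continue
--
--         if state == "dstr":
--             if ch == "\\" and i + 1 < n:
--                 out.append(ch)
--                 out.append(body[i + 1])
--                 i += 2
--                 continue
--             if ch == '"':
--                 out.append('"')
--                 i += 1
--                 state = "code"
--                 continue
--             out.append(ch)
--             i += 1
--             continue
--
--     return "".join(out)
-- ===== SOURCE B (Python) =====
-- def _terraform_strip_spurious_slash_quotes(body: str) -> str:
--     """Token-at-a-time rewrite: consume whole comments/strings with find/slices,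
--     strip backslash-quote pairs only in code runs."""
--     out = []
--     i = 0
--     n = len(body)
--     while i < n:
--         ch = body[i]
--         if ch == "#" or body.startswith("//", i):
--             j = body.find("\n", i)
--             j = n if j == -1 else j + 1
--             out.append(body[i:j])
--             i = j
--         elif body.startswith("/*", i):
--             j = body.find("*/", i + 2)
--             j = n if j == -1 else j + 2
--             out.append(body[i:j])
--             i = j
--         elif ch == '"':
--             j = i + 1
--             while j < n:
--                 if body[j] == "\\" and j + 1 < n:
--                     j += 2
--                 elif body[j] == '"':
--                     j += 1
--                     break
--                 else:
--                     j += 1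
--             out.append(body[i:j])
--             i = j
--         elif ch == "\\" and i + 1 < n and body[i + 1] in "\"'":
--             out.append(body[i + 1])
--             i += 2
--         else:
--             out.append(ch)
--             i += 1
--     return "".join(out)
-- ===== Notes on version B (the rewrite author's own statement) =====
-- stated objective: alternative
-- what changed: Replaces the per-character state-machine (state variable switched on every char) by a token-at-a-time scanner that consumes each whole comment/string with find/startswith and slices it through verbatim, stripping backslash-quote pairs only in code runs.
import Mathlib
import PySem

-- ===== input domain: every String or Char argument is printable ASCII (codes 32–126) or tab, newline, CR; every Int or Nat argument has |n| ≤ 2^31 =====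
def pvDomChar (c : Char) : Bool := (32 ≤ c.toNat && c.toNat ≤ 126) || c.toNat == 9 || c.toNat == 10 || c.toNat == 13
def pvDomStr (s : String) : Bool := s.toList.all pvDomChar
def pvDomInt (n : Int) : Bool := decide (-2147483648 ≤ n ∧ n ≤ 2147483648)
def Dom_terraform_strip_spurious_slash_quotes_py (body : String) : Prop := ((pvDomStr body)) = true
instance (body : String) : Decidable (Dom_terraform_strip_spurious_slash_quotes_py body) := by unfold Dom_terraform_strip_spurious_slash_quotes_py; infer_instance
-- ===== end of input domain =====

-- B replaces A's per-character state machine by a token-at-a-time scanner that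
-- consumes whole comments/strings and copies them verbatim (objective: alternative).

-- ===== PORT A =====
-- A's state variable: "code" / "line_hash" / "line_slash" / "block" / "dstr"
inductive AState | code | lineHash | lineSlash | block | dstr
deriving DecidableEq, Repr

-- literal port of A's while-loop: index scan becomes recursion on the char list,
-- the branches appear in A's order for each state
def goA : AState → List Char → List Char
  | _, [] => []
  | .code, '#' :: rest => '#' :: goA .lineHash rest
  | .code, '/' :: '/' :: rest => '/' :: '/' :: goA .lineSlash rest
  | .code, '/' :: '*' :: rest => '/' :: '*' :: goA .block rest
  | .code, '"' :: rest => '"' :: goA .dstr rest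
  | .code, '\\' :: q :: rest =>
      if q = '"' ∨ q = '\'' then q :: goA .code rest
      else '\\' :: goA .code (q :: rest)
  | .code, c :: rest => c :: goA .code rest
  | .lineHash, c :: rest => c :: goA (if c = '\n' then .code else .lineHash) rest
  | .lineSlash, c :: rest => c :: goA (if c = '\n' then .code else .lineSlash) rest
  | .block, '*' :: '/' :: rest => '*' :: '/' :: goA .code rest
  | .block, c :: rest => c :: goA .block rest
  | .dstr, '\\' :: c :: rest => '\\' :: c :: goA .dstr rest
  | .dstr, '"' :: rest => '"' :: goA .code rest
  | .dstr, c :: rest => c :: goA .dstr rest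
  termination_by _ xs => xs.length

def terraform_strip_spurious_slash_quotes_py (body : String) : String :=
  String.ofList (goA .code body.toList)

-- ===== PORT B =====
-- Source B: body.find("\n", i) + slice → consume through the newline (or to end)
def takeLine : List Char → List Char × List Char
  | [] => ([], [])
  | '\n' :: r => (['\n'], r)
  | c :: r => let (t, r') := takeLine r; (c :: t, r')

-- Source B: body.find("*/", i+2) + slice → consume through "*/" (or to end)
def takeBlock : List Char → List Char × List Char
  | [] => ([], [])
  | '*' :: '/' :: r => (['*', '/'], r)
  | c :: r => let (t, r') := takeBlock r; (c :: t, r')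

-- Source B: the inner while-loop scanning to the closing quote
def takeStr : List Char → List Char × List Char
  | [] => ([], [])
  | '\\' :: c :: r => let (t, r') := takeStr r; ('\\' :: c :: t, r')
  | '"' :: r => (['"'], r)
  | c :: r => let (t, r') := takeStr r; (c :: t, r')

theorem takeLine_len (xs : List Char) : (takeLine xs).2.length ≤ xs.length := by
  fun_induction takeLine xs <;> simp_all <;> omega

theorem takeBlock_len (xs : List Char) : (takeBlock xs).2.length ≤ xs.length := by
  fun_induction takeBlock xs <;> simp_all <;> omega

theorem takeStr_len (xs : List Char) : (takeStr xs).2.length ≤ xs.length := by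
  fun_induction takeStr xs <;> simp_all <;> omega

-- Source B's outer while-loop: dispatch on the token starting here, consume it whole
def goB : List Char → List Char
  | [] => []
  | '#' :: r => '#' :: ((takeLine r).1 ++ goB (takeLine r).2)
  | '/' :: '/' :: r => '/' :: '/' :: ((takeLine r).1 ++ goB (takeLine r).2)
  | '/' :: '*' :: r => '/' :: '*' :: ((takeBlock r).1 ++ goB (takeBlock r).2)
  | '"' :: r => '"' :: ((takeStr r).1 ++ goB (takeStr r).2)
  | '\\' :: q :: r =>
      if q = '"' ∨ q = '\'' then q :: goB r
      else '\\' :: goB (q :: r)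
  | c :: r => c :: goB r
  termination_by xs => xs.length
  decreasing_by
    all_goals simp_all
    · have := takeLine_len r; omega
    · have := takeLine_len r; omega
    · have := takeBlock_len r; omega
    · have := takeStr_len r; omega


def terraform_strip_spurious_slash_quotes_py_alt (body : String) : String :=
  String.ofList (goB body.toList)

-- ===== PRECONDITION & SPEC =====
def Spec_terraform_strip_spurious_slash_quotes_py (body : String) (out : String) : Prop := out = terraform_strip_spurious_slash_quotes_py_alt body
instance (body : String) (out : String) : Decidable (Spec_terraform_strip_spurious_slash_quotes_py body out) := by unfold Spec_terraform_strip_spurious_slash_quotes_py; infer_instance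

-- ===== CLAIM (what is proved, stated in full; the proofs are below) =====
def Claim_equal_terraform_strip_spurious_slash_quotes_py : Prop := ∀ (body : String), Dom_terraform_strip_spurious_slash_quotes_py body → Spec_terraform_strip_spurious_slash_quotes_py body (terraform_strip_spurious_slash_quotes_py body)

-- ===== LEMMAS AND PROOFS =====

-- A in a line-comment state copies exactly the chars takeLine consumes, then is back in code
theorem goA_lineHash (xs : List Char) :
    goA .lineHash xs = (takeLine xs).1 ++ goA .code (takeLine xs).2 := by
  fun_induction takeLine xs <;> simp_all [goA]

theorem goA_lineSlash (xs : List Char) :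
    goA .lineSlash xs = (takeLine xs).1 ++ goA .code (takeLine xs).2 := by
  fun_induction takeLine xs <;> simp_all [goA]

-- A in the block state copies exactly the chars takeBlock consumes, then is back in code
theorem goA_block (xs : List Char) :
    goA .block xs = (takeBlock xs).1 ++ goA .code (takeBlock xs).2 := by
  fun_induction takeBlock xs <;> simp_all [goA]

-- A in the string state copies exactly the chars takeStr consumes, then is back in code
theorem goA_dstr (xs : List Char) :
    goA .dstr xs = (takeStr xs).1 ++ goA .code (takeStr xs).2 := by
  fun_induction takeStr xs <;> simp_all [goA]

theorem goB_eq_goA (xs : List Char) : goB xs = goA .code xs := by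
  fun_induction goB xs <;>
    simp_all [goA, goA_lineHash, goA_lineSlash, goA_block, goA_dstr]

-- ===== VERDICT (by name: the statement is the Claim_ definition above) =====
theorem terraform_strip_spurious_slash_quotes_py_spec : Claim_equal_terraform_strip_spurious_slash_quotes_py := by
  intro body _
  unfold Spec_terraform_strip_spurious_slash_quotes_py
  unfold terraform_strip_spurious_slash_quotes_py terraform_strip_spurious_slash_quotes_py_alt
  rw [goB_eq_goA]
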